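-- pv_equiv track=rewrite | github.com/dariusnguyen/algorithm_data_structure_replit | aaa_Amazon/combineApplications.py | combineApplications
-- ===== SOURCE A (Python) =====
-- def combineApplications(foreground, background, cap):
-- 	res = None
-- 	maxMem = None
-- 	first = True
--
-- 	for i in foreground:
-- 		for j in background:
-- 			fID, fMem = i[0], i[1]
-- 			bID, bMem = j[0], j[1]
--
-- 			if first or (fMem + bMem < 7 and maxMem < fMem + bMem):
-- 				res = [fID, bID]
-- 				maxMem = fMem + bMem
-- 				first = False
-- 	return res
-- ===== SOURCE B (Python) =====
-- def combineApplications(foreground, background, cap):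
--     # Sort background once (memory descending, original index ascending, via one
--     # integer key), then binary-search the best partner for each foreground app.
--     if not foreground or not background:
--         return None
--     n = len(background)
--     order = sorted(enumerate(background), key=lambda t: -t[1][1] * (n + 1) + t[0])
--     res = [foreground[0][0], background[0][0]]
--     best = foreground[0][1] + background[0][1]
--     for f in foreground:
--         bound = 7 - f[1]
--         lo, hi = 0, n
--         while lo < hi:
--             mid = (lo + hi) // 2
--             if order[mid][1][1] < bound:
--                 hi = mid
--             else:
--                 lo = mid + 1
--         if lo < n:
--             row = order[lo][1]
--             s = f[1] + row[1]
--             if best < s: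
--                 res, best = [f[0], row[0]], s
--     return res
-- ===== Notes on version B (the rewrite author's own statement) =====
-- stated objective: faster
-- what changed: A scans all foreground x background pairs; B sorts the background once by (memory descending, original index ascending) and binary-searches the best partner for each foreground app, keeping the same first-pair seed and strict-improvement rule.
import Mathlib
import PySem

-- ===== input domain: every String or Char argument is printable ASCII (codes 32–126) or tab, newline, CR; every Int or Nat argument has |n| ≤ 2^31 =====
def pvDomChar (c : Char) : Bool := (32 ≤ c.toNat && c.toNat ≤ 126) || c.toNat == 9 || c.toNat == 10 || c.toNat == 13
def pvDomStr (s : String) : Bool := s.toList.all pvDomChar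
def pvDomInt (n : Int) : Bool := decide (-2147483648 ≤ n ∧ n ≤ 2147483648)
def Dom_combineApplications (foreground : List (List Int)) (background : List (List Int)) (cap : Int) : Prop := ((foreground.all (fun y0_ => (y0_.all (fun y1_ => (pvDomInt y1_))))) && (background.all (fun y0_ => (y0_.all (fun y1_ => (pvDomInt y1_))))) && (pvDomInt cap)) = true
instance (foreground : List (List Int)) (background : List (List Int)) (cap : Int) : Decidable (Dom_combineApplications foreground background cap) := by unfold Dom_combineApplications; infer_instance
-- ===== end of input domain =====

-- B sorts the background once (memory descending, original index ascending) and
-- binary-searches the best partner per foreground app: O((n+m) log m) vs A's O(n·m).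

-- ===== PORT A =====
def combineApplications (foreground : List (List Int)) (background : List (List Int)) (cap : Int) : Option (List Int) :=
  let st : Option (List Int) × Option Int × Bool := (none, none, true)
  let st := foreground.foldl (fun st i =>
    background.foldl (fun st j =>
      let fID := PySem.List.pyGetD i 0 0
      let fMem := PySem.List.pyGetD i 1 0
      let bID := PySem.List.pyGetD j 0 0
      let bMem := PySem.List.pyGetD j 1 0
      if st.2.2 = true ∨ (fMem + bMem < 7 ∧ st.2.1.getD 0 < fMem + bMem) then
        (some [fID, bID], some (fMem + bMem), false)
      else st) st) st
  st.1

-- ===== PORT B =====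
-- Source B's sort key: one integer encoding (memory descending, original index ascending)
def pvKey (n : Nat) (t : Int × List Int) : Int :=
  -(PySem.List.pyGetD t.2 1 0) * ((n : Int) + 1) + t.1

-- Source B's hand-written while-loop binary search: first index lo in [lo,hi) with
-- order[lo]'s memory < bound (indices are Nat list positions, as in Python)
def pvBS (order : List (Int × List Int)) (bound : Int) (lo hi : Nat) : Nat :=
  if _h : lo < hi then
    let mid := (lo + hi) / 2
    if PySem.List.pyGetD (order.getD mid (0, [])).2 1 0 < bound then
      pvBS order bound lo mid
    else
      pvBS order bound (mid + 1) hi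
  else lo
termination_by hi - lo
decreasing_by all_goals omega

def combineApplications_alt (foreground : List (List Int)) (background : List (List Int)) (cap : Int) : Option (List Int) :=
  match foreground, background with
  | [], _ => none
  | _ :: _, [] => none
  | f0 :: _, b0 :: _ =>
    let n := background.length
    let order := PySem.List.sorted (PySem.List.enumerate background 0) (pvKey n) false
    let st : List Int × Int :=
      ([PySem.List.pyGetD f0 0 0, PySem.List.pyGetD b0 0 0],
       PySem.List.pyGetD f0 1 0 + PySem.List.pyGetD b0 1 0)
    let st := foreground.foldl (fun st f =>
      let bound := 7 - PySem.List.pyGetD f 1 0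
      let lo := pvBS order bound 0 n
      if lo < n then
        let t := order.getD lo (0, [])
        let s := PySem.List.pyGetD f 1 0 + PySem.List.pyGetD t.2 1 0
        if st.2 < s then ([PySem.List.pyGetD f 0 0, PySem.List.pyGetD t.2 0 0], s) else st
      else st) st
    some st.1

-- ===== PRECONDITION & SPEC =====
-- Pre_ excludes exactly the inputs where Python A raises IndexError: when both
-- lists are nonempty, every row of both lists is read at positions 0 and 1.
def Pre_combineApplications (foreground : List (List Int)) (background : List (List Int)) (cap : Int) : Prop :=
  foreground = [] ∨ background = [] ∨
    ((∀ r ∈ foreground, 2 ≤ r.length) ∧ (∀ r ∈ background, 2 ≤ r.length))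
instance (foreground : List (List Int)) (background : List (List Int)) (cap : Int) : Decidable (Pre_combineApplications foreground background cap) := by unfold Pre_combineApplications; infer_instance
def pvWitness_combineApplications : List (List Int) × List (List Int) × Int := ([[1, 2]], [[3, 4]], 7)

def Spec_combineApplications (foreground : List (List Int)) (background : List (List Int)) (cap : Int) (out : Option (List Int)) : Prop := out = combineApplications_alt foreground background cap
instance (foreground : List (List Int)) (background : List (List Int)) (cap : Int) (out : Option (List Int)) : Decidable (Spec_combineApplications foreground background cap out) := by unfold Spec_combineApplications; infer_instance

-- ===== CLAIM (what is proved, stated in full; the proofs are below) =====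
def Claim_equal_combineApplications : Prop := ∀ (foreground : List (List Int)) (background : List (List Int)) (cap : Int), Dom_combineApplications foreground background cap → Pre_combineApplications foreground background cap → Spec_combineApplications foreground background cap (combineApplications foreground background cap)

-- ===== LEMMAS AND PROOFS =====

-- proof-side reference: the earliest background row whose memory is maximal below `bound`
def pvBP (bound : Int) : List (List Int) → Option (List Int)
  | [] => none
  | j :: l =>
    if PySem.List.pyGetD j 1 0 < bound then
      match pvBP bound l with
      | some j' =>
        if PySem.List.pyGetD j 1 0 < PySem.List.pyGetD j' 1 0 then some j' else some j
      | none => some j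
    else pvBP bound l

-- index-tracking variant over the enumerated list
def pvBPI (bound : Int) : Int → List (List Int) → Option (Int × List Int)
  | _, [] => none
  | k, j :: l =>
    if PySem.List.pyGetD j 1 0 < bound then
      match pvBPI bound (k + 1) l with
      | some t' =>
        if PySem.List.pyGetD j 1 0 < PySem.List.pyGetD t'.2 1 0 then some t' else some (k, j)
      | none => some (k, j)
    else pvBPI bound (k + 1) l

-- how one best-partner candidate updates the running (pair, best) state
def pvComb (f : List Int) (o : Option (List Int)) (p : List Int) (m : Int) : List Int × Int :=
  match o with
  | none => (p, m)
  | some j =>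
    if m < PySem.List.pyGetD f 1 0 + PySem.List.pyGetD j 1 0 then
      ([PySem.List.pyGetD f 0 0, PySem.List.pyGetD j 0 0],
       PySem.List.pyGetD f 1 0 + PySem.List.pyGetD j 1 0)
    else (p, m)

lemma pv_innerA (i : List Int) (bg : List (List Int)) (p : List Int) (m : Int) :
    bg.foldl (fun st j =>
      if st.2.2 = true ∨ (PySem.List.pyGetD i 1 0 + PySem.List.pyGetD j 1 0 < 7 ∧
          st.2.1.getD 0 < PySem.List.pyGetD i 1 0 + PySem.List.pyGetD j 1 0) then
        (some [PySem.List.pyGetD i 0 0, PySem.List.pyGetD j 0 0],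
         some (PySem.List.pyGetD i 1 0 + PySem.List.pyGetD j 1 0), false)
      else st) ((some p, some m, false) : Option (List Int) × Option Int × Bool)
    = (some (pvComb i (pvBP (7 - PySem.List.pyGetD i 1 0) bg) p m).1,
       some (pvComb i (pvBP (7 - PySem.List.pyGetD i 1 0) bg) p m).2, false) := by
  induction bg generalizing p m with
  | nil => simp [pvBP, pvComb]
  | cons j l ih =>
    simp only [List.foldl_cons, Option.getD_some]
    rw [pvBP]
    by_cases h1 : PySem.List.pyGetD i 1 0 + PySem.List.pyGetD j 1 0 < 7
    · rw [if_pos (show PySem.List.pyGetD j 1 0 < 7 - PySem.List.pyGetD i 1 0 by omega)]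
      by_cases h2 : m < PySem.List.pyGetD i 1 0 + PySem.List.pyGetD j 1 0
      · rw [if_pos (Or.inr ⟨h1, h2⟩)]
        rw [ih]
        rcases hbp : pvBP (7 - PySem.List.pyGetD i 1 0) l with _ | j' <;>
          simp only [pvComb] <;> split_ifs <;> first | rfl | omega | (simp_all; split_ifs <;> simp_all <;> omega) | simp_all
      · rw [if_neg (by simp [h2])]
        rw [ih]
        rcases hbp : pvBP (7 - PySem.List.pyGetD i 1 0) l with _ | j' <;>
          simp only [pvComb] <;> split_ifs <;> first | rfl | omega | (simp_all; split_ifs <;> simp_all <;> omega) | simp_all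
    · rw [if_neg (show ¬ PySem.List.pyGetD j 1 0 < 7 - PySem.List.pyGetD i 1 0 by omega)]
      rw [if_neg (by simp [h1])]
      exact ih p m


lemma pv_mem_enumerate (bg : List (List Int)) (s : Int) (t : Int × List Int) :
    t ∈ PySem.List.enumerate bg s ↔ ∃ k : Nat, ∃ _h : k < bg.length, t = (s + k, bg[k]) := by
  induction bg generalizing s with
  | nil => simp [PySem.List.enumerate_nil]
  | cons x l ih =>
    rw [PySem.List.enumerate_cons]
    simp only [List.mem_cons, ih]
    constructor
    · rintro (rfl | ⟨k, hk, rfl⟩)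
      · exact ⟨0, by simp, by simp⟩
      · refine ⟨k + 1, by simpa using hk, ?_⟩
        simp only [List.getElem_cons_succ]
        congr 1
        push_cast
        ring
    · rintro ⟨k, hk, rfl⟩
      cases k with
      | zero => left; simp
      | succ k =>
        right
        refine ⟨k, by simpa using hk, ?_⟩
        simp only [List.getElem_cons_succ]
        congr 1
        push_cast
        ring

lemma pvBS_spec (order : List (Int × List Int)) (bound : Int)
    (hmono : ∀ a b : Nat, a ≤ b → b < order.length →
      PySem.List.pyGetD (order.getD b (0, [])).2 1 0 ≤ PySem.List.pyGetD (order.getD a (0, [])).2 1 0) :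
    ∀ (n lo hi : Nat), hi - lo = n → lo ≤ hi → hi ≤ order.length →
    (∀ k, k < lo → ¬ PySem.List.pyGetD (order.getD k (0, [])).2 1 0 < bound) →
    (∀ k, hi ≤ k → k < order.length → PySem.List.pyGetD (order.getD k (0, [])).2 1 0 < bound) →
    ((∀ k, k < pvBS order bound lo hi → ¬ PySem.List.pyGetD (order.getD k (0, [])).2 1 0 < bound) ∧
     (∀ k, pvBS order bound lo hi ≤ k → k < order.length → PySem.List.pyGetD (order.getD k (0, [])).2 1 0 < bound) ∧
     pvBS order bound lo hi ≤ order.length) := by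
  intro n
  induction n using Nat.strong_induction_on with
  | _ n ih =>
    intro lo hi hn hle hlen h1 h2
    rw [pvBS]
    by_cases hlt : lo < hi
    · rw [dif_pos hlt]
      simp only
      by_cases ht : PySem.List.pyGetD (order.getD ((lo + hi) / 2) (0, [])).2 1 0 < bound
      · rw [if_pos ht]
        refine ih ((lo + hi) / 2 - lo) (by omega) lo ((lo + hi) / 2) rfl (by omega) (by omega) h1 ?_
        intro k hk hklen
        exact lt_of_le_of_lt (hmono ((lo + hi) / 2) k hk hklen) ht
      · rw [if_neg ht]
        refine ih (hi - ((lo + hi) / 2 + 1)) (by omega) ((lo + hi) / 2 + 1) hi rfl (by omega) hlen ?_ h2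
        intro k hk habs
        exact ht (lt_of_le_of_lt (hmono k ((lo + hi) / 2) (Nat.lt_succ_iff.mp hk) (by omega)) habs)
    · rw [dif_neg hlt]
      have : lo = hi := by omega
      subst this
      exact ⟨h1, h2, le_trans hle hlen⟩

lemma pv_enum_lb (bg : List (List Int)) (s : Int) (t : Int × List Int)
    (h : t ∈ PySem.List.enumerate bg s) : s ≤ t.1 := by
  rcases (pv_mem_enumerate bg s t).mp h with ⟨k, hk, rfl⟩
  simp only
  omega

lemma pvBPI_map (bound : Int) (k : Int) (bg : List (List Int)) :
    (pvBPI bound k bg).map Prod.snd = pvBP bound bg := by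
  induction bg generalizing k with
  | nil => simp [pvBPI, pvBP]
  | cons j l ih =>
    rw [pvBPI, pvBP]
    split_ifs with h
    · rw [← ih (k + 1)]
      rcases hb : pvBPI bound (k + 1) l with _ | t' <;> simp only [Option.map_some, Option.map_none] <;>
        split_ifs <;> rfl
    · exact ih (k + 1)

lemma pvBPI_mem (bound : Int) (k : Int) (bg : List (List Int)) (t : Int × List Int)
    (h : pvBPI bound k bg = some t) : t ∈ PySem.List.enumerate bg k := by
  induction bg generalizing k with
  | nil => simp [pvBPI] at h
  | cons j l ih =>
    rw [pvBPI] at h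
    rw [PySem.List.enumerate_cons, List.mem_cons]
    split_ifs at h with hv
    · rcases hb : pvBPI bound (k + 1) l with _ | t' <;> rw [hb] at h <;> dsimp only at h
      · left; exact (Option.some_inj.mp h).symm
      · split_ifs at h with hc
        · cases Option.some_inj.mp h; right; exact ih (k + 1) hb
        · left; exact (Option.some_inj.mp h).symm
    · right; exact ih (k + 1) h

lemma pvBPI_valid (bound : Int) (k : Int) (bg : List (List Int)) (t : Int × List Int)
    (h : pvBPI bound k bg = some t) : PySem.List.pyGetD t.2 1 0 < bound := by
  induction bg generalizing k with
  | nil => simp [pvBPI] at h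
  | cons j l ih =>
    rw [pvBPI] at h
    split_ifs at h with hv
    · rcases hb : pvBPI bound (k + 1) l with _ | t' <;> rw [hb] at h <;> dsimp only at h
      · cases Option.some_inj.mp h; simpa using hv
      · split_ifs at h with hc
        · cases Option.some_inj.mp h; exact ih (k + 1) hb
        · cases Option.some_inj.mp h; simpa using hv
    · exact ih (k + 1) h

lemma pvBPI_none (bound : Int) (k : Int) (bg : List (List Int))
    (h : pvBPI bound k bg = none) :
    ∀ t' ∈ PySem.List.enumerate bg k, ¬ PySem.List.pyGetD t'.2 1 0 < bound := by
  induction bg generalizing k with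
  | nil => simp [PySem.List.enumerate_nil]
  | cons j l ih =>
    rw [pvBPI] at h
    split_ifs at h with hv
    · rcases hb : pvBPI bound (k + 1) l with _ | t' <;> rw [hb] at h <;> dsimp only at h
      · exact absurd h (by simp)
      · split_ifs at h
    · intro t' ht'
      rw [PySem.List.enumerate_cons, List.mem_cons] at ht'
      rcases ht' with rfl | ht'
      · simpa using hv
      · exact ih (k + 1) h t' ht' 

lemma pvBPI_min (bound : Int) (k : Int) (bg : List (List Int)) (t : Int × List Int)
    (h : pvBPI bound k bg = some t) :
    ∀ t' ∈ PySem.List.enumerate bg k, PySem.List.pyGetD t'.2 1 0 < bound →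
      PySem.List.pyGetD t'.2 1 0 < PySem.List.pyGetD t.2 1 0 ∨
      (PySem.List.pyGetD t'.2 1 0 = PySem.List.pyGetD t.2 1 0 ∧ t.1 ≤ t'.1) := by
  induction bg generalizing k t with
  | nil => simp [pvBPI] at h
  | cons j l ih =>
    rw [pvBPI] at h
    intro t' ht' hval
    rw [PySem.List.enumerate_cons, List.mem_cons] at ht'
    split_ifs at h with hv
    · rcases hb : pvBPI bound (k + 1) l with _ | u <;> rw [hb] at h <;> dsimp only at h
      · cases Option.some_inj.mp h
        rcases ht' with rfl | ht'
        · right; exact ⟨rfl, le_refl _⟩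
        · exact absurd hval (pvBPI_none bound (k + 1) l hb t' ht')
      · split_ifs at h with hc
        · cases Option.some_inj.mp h
          rcases ht' with rfl | ht'
          · left; exact hc
          · exact ih (k + 1) t hb t' ht' hval
        · cases Option.some_inj.mp h
          rcases ht' with rfl | ht'
          · right; exact ⟨rfl, le_refl _⟩
          · have hu := ih (k + 1) u hb t' ht' hval
            have hlb := pv_enum_lb l (k + 1) t' ht'
            simp only at *
            rcases hu with hu | ⟨hu, _⟩
            · left; omega
            · by_cases hje : PySem.List.pyGetD u.2 1 0 = PySem.List.pyGetD j 1 0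
              · right; constructor <;> omega
              · left; omega
    · rcases ht' with rfl | ht'
      · exact absurd hval (by simpa using hv)
      · exact ih (k + 1) t h t' ht' hval

-- lexicographic reading of the scalar sort key
lemma pv_key_le (n : Nat) (m0 i0 mt it : Int) (hi0 : 0 ≤ i0) (_hi0' : i0 < n) (_hit : 0 ≤ it) (hit' : it < n)
    (h : -m0 * ((n : Int) + 1) + i0 ≤ -mt * ((n : Int) + 1) + it) :
    mt < m0 ∨ (mt = m0 ∧ i0 ≤ it) := by
  by_cases he : mt = m0
  · subst he; right; exact ⟨rfl, by linarith⟩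
  · left
    by_contra hlt
    have h1 : m0 + 1 ≤ mt := by omega
    have h2 : mt * ((n : Int) + 1) - m0 * ((n : Int) + 1) ≤ it - i0 := by linarith
    have h4 := mul_le_mul_of_nonneg_right h1 (show (0 : ℤ) ≤ (n : Int) + 1 by positivity)
    nlinarith [h2, h4, hit', hi0]

-- the sorted order locates the earliest maximal valid background row
lemma pv_bp_of_sorted (bg : List (List Int)) (bound : Int) (r : Nat)
    (hP1 : ∀ k, k < r → ¬ PySem.List.pyGetD (((PySem.List.sorted (PySem.List.enumerate bg 0) (pvKey bg.length) false).getD k (0, [])).2) 1 0 < bound)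
    (hP2 : ∀ k, r ≤ k → k < (PySem.List.sorted (PySem.List.enumerate bg 0) (pvKey bg.length) false).length → PySem.List.pyGetD (((PySem.List.sorted (PySem.List.enumerate bg 0) (pvKey bg.length) false).getD k (0, [])).2) 1 0 < bound) :
    pvBP bound bg = (if r < (PySem.List.sorted (PySem.List.enumerate bg 0) (pvKey bg.length) false).length then some (((PySem.List.sorted (PySem.List.enumerate bg 0) (pvKey bg.length) false).getD r (0, [])).2) else none) := by
  set S := PySem.List.sorted (PySem.List.enumerate bg 0) (pvKey bg.length) false with hS
  have hperm : S.Perm (PySem.List.enumerate bg 0) := PySem.List.sorted_perm _ _ _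
  have hmemS : ∀ t ∈ S, ∃ k : Nat, ∃ _h : k < bg.length, t = ((k : Int), bg[k]) := by
    intro t ht
    rcases (pv_mem_enumerate bg 0 t).mp (hperm.mem_iff.mp ht) with ⟨k, hk, rfl⟩
    exact ⟨k, hk, by simp⟩
  by_cases hr : r < S.length
  · rw [if_pos hr]
    rw [List.getD_eq_getElem S (0, []) hr]
    have ht0S : S[r] ∈ S := List.getElem_mem hr
    have ht0v : PySem.List.pyGetD (S[r]).2 1 0 < bound := by
      have := hP2 r le_rfl hr
      rwa [List.getD_eq_getElem S (0, []) hr] at this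
    rcases hbpi : pvBPI bound 0 bg with _ | t
    · exact absurd ht0v (pvBPI_none bound 0 bg hbpi S[r] (hperm.mem_iff.mp ht0S))
    · have htmem : t ∈ S := hperm.mem_iff.mpr (pvBPI_mem _ _ _ _ hbpi)
      rcases List.mem_iff_getElem.mp htmem with ⟨jx, hjx, hjt⟩
      have htv : PySem.List.pyGetD t.2 1 0 < bound := pvBPI_valid _ _ _ _ hbpi
      have hjr : r ≤ jx := by
        by_contra hlt
        exact hP1 jx (by omega) (by rw [List.getD_eq_getElem S (0, []) hjx, hjt]; exact htv)
      have hmin := pvBPI_min bound 0 bg t hbpi S[r] (hperm.mem_iff.mp ht0S) ht0v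
      have hteq : t = S[r] := by
        rcases Nat.eq_or_lt_of_le hjr with he | hlt
        · rw [← hjt]; congr 1; omega
        · have hkey := List.pairwise_iff_getElem.mp (PySem.List.sorted_pairwise (PySem.List.enumerate bg 0) (pvKey bg.length)) r jx hr hjx hlt
          rw [hjt] at hkey
          rcases hmemS _ ht0S with ⟨k0, hk0, he0⟩
          rcases hmemS t htmem with ⟨kt, hkt, het⟩
          have hcomp := pv_key_le bg.length (PySem.List.pyGetD (S[r]).2 1 0) (S[r]).1
              (PySem.List.pyGetD t.2 1 0) t.1
              (by rw [he0]; positivity) (by rw [he0]; dsimp only; exact_mod_cast hk0)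
              (by rw [het]; positivity) (by rw [het]; dsimp only; exact_mod_cast hkt)
              (by simpa [pvKey] using hkey)
          have hidx : t.1 = (S[r]).1 := by
            rcases hcomp with hlt' | ⟨heq, hle⟩
            · rcases hmin with hlt'' | ⟨heq'', hle''⟩ <;> omega
            · rcases hmin with hlt'' | ⟨heq'', hle''⟩ <;> omega
          rw [het, he0]
          rw [het, he0] at hidx
          simp only at hidx
          have : kt = k0 := by exact_mod_cast hidx
          subst this
          rfl
      rw [← pvBPI_map bound 0 bg, hbpi, hteq]
      rfl
  · rw [if_neg hr]
    rcases hbpi : pvBPI bound 0 bg with _ | t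
    · rw [← pvBPI_map bound 0 bg, hbpi]; rfl
    · exfalso
      have htmem : t ∈ S := hperm.mem_iff.mpr (pvBPI_mem _ _ _ _ hbpi)
      rcases List.mem_iff_getElem.mp htmem with ⟨jx, hjx, hjt⟩
      refine hP1 jx (by omega) ?_
      rw [List.getD_eq_getElem S (0, []) hjx, hjt]
      exact pvBPI_valid _ _ _ _ hbpi


lemma pv_mem_sorted (bg : List (List Int)) (t : Int × List Int)
    (ht : t ∈ (PySem.List.sorted (PySem.List.enumerate bg 0) (pvKey bg.length) false)) : ∃ k : Nat, ∃ _h : k < bg.length, t = ((k : Int), bg[k]) := by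
  have hperm : (PySem.List.sorted (PySem.List.enumerate bg 0) (pvKey bg.length) false).Perm (PySem.List.enumerate bg 0) := PySem.List.sorted_perm _ _ _
  rcases (pv_mem_enumerate bg 0 t).mp (hperm.mem_iff.mp ht) with ⟨k, hk, rfl⟩
  exact ⟨k, hk, by simp⟩

lemma pv_len_sorted (bg : List (List Int)) : (PySem.List.sorted (PySem.List.enumerate bg 0) (pvKey bg.length) false).length = bg.length := by
  rw [PySem.List.length_sorted, PySem.List.length_enumerate]

lemma pv_sorted_mono (bg : List (List Int)) :
    ∀ a b : Nat, a ≤ b → b < (PySem.List.sorted (PySem.List.enumerate bg 0) (pvKey bg.length) false).length →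
      PySem.List.pyGetD ((PySem.List.sorted (PySem.List.enumerate bg 0) (pvKey bg.length) false).getD b (0, [])).2 1 0 ≤ PySem.List.pyGetD ((PySem.List.sorted (PySem.List.enumerate bg 0) (pvKey bg.length) false).getD a (0, [])).2 1 0 := by
  intro a b hab hbl
  rcases Nat.eq_or_lt_of_le hab with rfl | hab'
  · exact le_refl _
  · rw [List.getD_eq_getElem _ _ hbl, List.getD_eq_getElem _ _ (by omega)]
    have hk := List.pairwise_iff_getElem.mp
      (PySem.List.sorted_pairwise (PySem.List.enumerate bg 0) (pvKey bg.length)) a b (by omega) hbl hab'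
    rcases pv_mem_sorted bg _ (List.getElem_mem (l := (PySem.List.sorted (PySem.List.enumerate bg 0) (pvKey bg.length) false)) (by omega : a < (PySem.List.sorted (PySem.List.enumerate bg 0) (pvKey bg.length) false).length)) with ⟨ka, hka, hea⟩
    rcases pv_mem_sorted bg _ (List.getElem_mem (l := (PySem.List.sorted (PySem.List.enumerate bg 0) (pvKey bg.length) false)) hbl) with ⟨kb, hkb, heb⟩
    have hcomp := pv_key_le bg.length (PySem.List.pyGetD ((PySem.List.sorted (PySem.List.enumerate bg 0) (pvKey bg.length) false)[a]).2 1 0) ((PySem.List.sorted (PySem.List.enumerate bg 0) (pvKey bg.length) false)[a]).1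
        (PySem.List.pyGetD ((PySem.List.sorted (PySem.List.enumerate bg 0) (pvKey bg.length) false)[b]).2 1 0) ((PySem.List.sorted (PySem.List.enumerate bg 0) (pvKey bg.length) false)[b]).1
        (by rw [hea]; positivity) (by rw [hea]; dsimp only; exact_mod_cast hka)
        (by rw [heb]; positivity) (by rw [heb]; dsimp only; exact_mod_cast hkb)
        (by simpa [pvKey] using hk)
    rcases hcomp with h | ⟨h, _⟩ <;> omega

lemma pv_rowB (bg : List (List Int)) (f p0 : List Int) (m0 : Int) :
    (if pvBS (PySem.List.sorted (PySem.List.enumerate bg 0) (pvKey bg.length) false) (7 - PySem.List.pyGetD f 1 0) 0 bg.length < bg.length then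
      (if m0 < PySem.List.pyGetD f 1 0 + PySem.List.pyGetD ((PySem.List.sorted (PySem.List.enumerate bg 0) (pvKey bg.length) false).getD (pvBS (PySem.List.sorted (PySem.List.enumerate bg 0) (pvKey bg.length) false) (7 - PySem.List.pyGetD f 1 0) 0 bg.length) (0, [])).2 1 0 then
        ([PySem.List.pyGetD f 0 0, PySem.List.pyGetD ((PySem.List.sorted (PySem.List.enumerate bg 0) (pvKey bg.length) false).getD (pvBS (PySem.List.sorted (PySem.List.enumerate bg 0) (pvKey bg.length) false) (7 - PySem.List.pyGetD f 1 0) 0 bg.length) (0, [])).2 0 0],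
         PySem.List.pyGetD f 1 0 + PySem.List.pyGetD ((PySem.List.sorted (PySem.List.enumerate bg 0) (pvKey bg.length) false).getD (pvBS (PySem.List.sorted (PySem.List.enumerate bg 0) (pvKey bg.length) false) (7 - PySem.List.pyGetD f 1 0) 0 bg.length) (0, [])).2 1 0)
       else (p0, m0))
     else (p0, m0))
    = pvComb f (pvBP (7 - PySem.List.pyGetD f 1 0) bg) p0 m0 := by
  obtain ⟨P1, P2, hrle⟩ := pvBS_spec (PySem.List.sorted (PySem.List.enumerate bg 0) (pvKey bg.length) false) (7 - PySem.List.pyGetD f 1 0) (pv_sorted_mono bg)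
    (bg.length - 0) 0 bg.length rfl (by omega) (by rw [pv_len_sorted bg])
    (by omega)
    (by intro k hk hk'; rw [pv_len_sorted bg] at hk'; omega)
  rw [pv_bp_of_sorted bg (7 - PySem.List.pyGetD f 1 0) (pvBS (PySem.List.sorted (PySem.List.enumerate bg 0) (pvKey bg.length) false) (7 - PySem.List.pyGetD f 1 0) 0 bg.length) P1 P2]
  by_cases hr : (pvBS (PySem.List.sorted (PySem.List.enumerate bg 0) (pvKey bg.length) false) (7 - PySem.List.pyGetD f 1 0) 0 bg.length) < bg.length
  · rw [if_pos (show (pvBS (PySem.List.sorted (PySem.List.enumerate bg 0) (pvKey bg.length) false) (7 - PySem.List.pyGetD f 1 0) 0 bg.length) < (PySem.List.sorted (PySem.List.enumerate bg 0) (pvKey bg.length) false).length by rw [pv_len_sorted bg]; exact hr)]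
    rw [if_pos hr]
    simp only [pvComb]
  · rw [if_neg (show ¬ (pvBS (PySem.List.sorted (PySem.List.enumerate bg 0) (pvKey bg.length) false) (7 - PySem.List.pyGetD f 1 0) 0 bg.length) < (PySem.List.sorted (PySem.List.enumerate bg 0) (pvKey bg.length) false).length by rw [pv_len_sorted bg]; exact hr)]
    rw [if_neg hr]
    simp only [pvComb]

lemma pv_head (f b0 : List Int) (br : List (List Int)) :
    pvComb f (pvBP (7 - PySem.List.pyGetD f 1 0) br)
      [PySem.List.pyGetD f 0 0, PySem.List.pyGetD b0 0 0]
      (PySem.List.pyGetD f 1 0 + PySem.List.pyGetD b0 1 0)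
    = pvComb f (pvBP (7 - PySem.List.pyGetD f 1 0) (b0 :: br))
      [PySem.List.pyGetD f 0 0, PySem.List.pyGetD b0 0 0]
      (PySem.List.pyGetD f 1 0 + PySem.List.pyGetD b0 1 0) := by
  conv_rhs => rw [pvBP]
  split_ifs with hv
  · rcases hb : pvBP (7 - PySem.List.pyGetD f 1 0) br with _ | j' <;>
      simp only [pvComb] <;> split_ifs <;> (try simp only [pvComb]) <;> (try split_ifs) <;>
      first | rfl | omega
  · rfl

lemma pv_outer (bg : List (List Int)) (fg : List (List Int)) (p : List Int) (m : Int) :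
    fg.foldl (fun st i => bg.foldl (fun st j =>
      if st.2.2 = true ∨ (PySem.List.pyGetD i 1 0 + PySem.List.pyGetD j 1 0 < 7 ∧
          st.2.1.getD 0 < PySem.List.pyGetD i 1 0 + PySem.List.pyGetD j 1 0) then
        (some [PySem.List.pyGetD i 0 0, PySem.List.pyGetD j 0 0],
         some (PySem.List.pyGetD i 1 0 + PySem.List.pyGetD j 1 0), false)
      else st) st) ((some p, some m, false) : Option (List Int) × Option Int × Bool)
    = (some (fg.foldl (fun (st : List Int × Int) f =>
      if pvBS (PySem.List.sorted (PySem.List.enumerate bg 0) (pvKey bg.length) false) (7 - PySem.List.pyGetD f 1 0) 0 bg.length < bg.length then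
        (if st.2 < PySem.List.pyGetD f 1 0 + PySem.List.pyGetD ((PySem.List.sorted (PySem.List.enumerate bg 0) (pvKey bg.length) false).getD (pvBS (PySem.List.sorted (PySem.List.enumerate bg 0) (pvKey bg.length) false) (7 - PySem.List.pyGetD f 1 0) 0 bg.length) (0, [])).2 1 0 then
          ([PySem.List.pyGetD f 0 0, PySem.List.pyGetD ((PySem.List.sorted (PySem.List.enumerate bg 0) (pvKey bg.length) false).getD (pvBS (PySem.List.sorted (PySem.List.enumerate bg 0) (pvKey bg.length) false) (7 - PySem.List.pyGetD f 1 0) 0 bg.length) (0, [])).2 0 0],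
           PySem.List.pyGetD f 1 0 + PySem.List.pyGetD ((PySem.List.sorted (PySem.List.enumerate bg 0) (pvKey bg.length) false).getD (pvBS (PySem.List.sorted (PySem.List.enumerate bg 0) (pvKey bg.length) false) (7 - PySem.List.pyGetD f 1 0) 0 bg.length) (0, [])).2 1 0)
         else st)
      else st) (p, m)).1, some (fg.foldl (fun (st : List Int × Int) f =>
      if pvBS (PySem.List.sorted (PySem.List.enumerate bg 0) (pvKey bg.length) false) (7 - PySem.List.pyGetD f 1 0) 0 bg.length < bg.length then
        (if st.2 < PySem.List.pyGetD f 1 0 + PySem.List.pyGetD ((PySem.List.sorted (PySem.List.enumerate bg 0) (pvKey bg.length) false).getD (pvBS (PySem.List.sorted (PySem.List.enumerate bg 0) (pvKey bg.length) false) (7 - PySem.List.pyGetD f 1 0) 0 bg.length) (0, [])).2 1 0 then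
          ([PySem.List.pyGetD f 0 0, PySem.List.pyGetD ((PySem.List.sorted (PySem.List.enumerate bg 0) (pvKey bg.length) false).getD (pvBS (PySem.List.sorted (PySem.List.enumerate bg 0) (pvKey bg.length) false) (7 - PySem.List.pyGetD f 1 0) 0 bg.length) (0, [])).2 0 0],
           PySem.List.pyGetD f 1 0 + PySem.List.pyGetD ((PySem.List.sorted (PySem.List.enumerate bg 0) (pvKey bg.length) false).getD (pvBS (PySem.List.sorted (PySem.List.enumerate bg 0) (pvKey bg.length) false) (7 - PySem.List.pyGetD f 1 0) 0 bg.length) (0, [])).2 1 0)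
         else st)
      else st) (p, m)).2, false) := by
  induction fg generalizing p m with
  | nil => rfl
  | cons f fr ih =>
    simp only [List.foldl_cons]
    rw [pv_innerA f bg p m, pv_rowB bg f p m]
    exact ih _ _

theorem combineApplications_spec : Claim_equal_combineApplications := by
  intro fg bg cap _ _
  show combineApplications fg bg cap = combineApplications_alt fg bg cap
  cases fg with
  | nil => rfl
  | cons f0 fr =>
    cases bg with
    | nil =>
      simp only [combineApplications, combineApplications_alt, List.foldl_nil]
      have hconst : ∀ (l : List (List Int)) (st : Option (List Int) × Option Int × Bool),
          List.foldl (fun st (_ : List Int) => st) st l = st := by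
        intro l
        induction l with
        | nil => intro st; rfl
        | cons x xs ih => intro st; rw [List.foldl_cons]; exact ih st
      rw [hconst]
    | cons b0 br =>
      simp only [combineApplications, combineApplications_alt]
      rw [List.foldl_cons, List.foldl_cons, List.foldl_cons]
      rw [if_pos (Or.inl rfl)]
      rw [pv_innerA f0 br [PySem.List.pyGetD f0 0 0, PySem.List.pyGetD b0 0 0]
        (PySem.List.pyGetD f0 1 0 + PySem.List.pyGetD b0 1 0)]
      rw [pv_head f0 b0 br]
      rw [pv_rowB (b0 :: br) f0 [PySem.List.pyGetD f0 0 0, PySem.List.pyGetD b0 0 0]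
        (PySem.List.pyGetD f0 1 0 + PySem.List.pyGetD b0 1 0)]
      rw [pv_outer (b0 :: br) fr]
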